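-- pv_equiv track=rewrite | github.com/MrBrantCode/unitest_baseline | mut_generate/mist_train_taco/taco_7416/solution.py | rectangle_count
-- ===== SOURCE A (Python) =====
-- import math
--
-- def rectangle_count(A: int) -> int:
--     lim = int(math.sqrt(A))
--     count = 0
--
--     for i in range(1, lim + 1):
--         if A % i == 0:
--             t = A // i
--             if i % 2 == 0 and t % 2 == 0:
--                 if i == t:
--                     count += 1
--             else:
--                 count += 1
--
--     return count
-- ===== SOURCE B (Python) =====
-- import math
--
--
-- def rectangle_count(A: int) -> int:
--     # Plain count of divisors of n that are <= sqrt(n).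
--     def below_sqrt_divisors(n):
--         r = int(math.sqrt(n))
--         return sum(1 for i in range(1, r + 1) if n % i == 0)
--
--     total = below_sqrt_divisors(A)
--     if A > 0 and A % 4 == 0:
--         # Excluded pairs (i, A//i) with both members even and i != A//i
--         # correspond exactly to the distinct divisor pairs of A//4.
--         q = A // 4
--         s = int(math.sqrt(q))
--         total -= below_sqrt_divisors(q)
--         if s * s == q:
--             total += 1
--     return total
-- ===== Notes on version B (the rewrite author's own statement) =====
-- stated objective: alternative
-- what changed: B replaces A's per-divisor parity test inside the loop by a closed-form correction: it counts all divisor pairs of A, then subtracts the both-even distinct pairs, which equal the distinct divisor pairs of A/4 when 4 | A (plain divisor counts plus a perfect-square adjustment).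
import Mathlib
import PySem

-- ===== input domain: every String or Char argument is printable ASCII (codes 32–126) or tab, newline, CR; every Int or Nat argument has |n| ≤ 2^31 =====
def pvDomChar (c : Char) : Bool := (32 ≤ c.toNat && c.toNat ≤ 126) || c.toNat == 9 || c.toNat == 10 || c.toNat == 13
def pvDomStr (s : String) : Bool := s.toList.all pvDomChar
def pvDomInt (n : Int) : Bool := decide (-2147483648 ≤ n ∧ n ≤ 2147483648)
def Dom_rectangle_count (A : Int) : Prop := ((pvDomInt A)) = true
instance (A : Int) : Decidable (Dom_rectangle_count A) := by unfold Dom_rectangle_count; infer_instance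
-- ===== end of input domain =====

-- B replaces A's per-divisor parity test inside the loop by plain divisor counts with a
-- closed-form correction through the divisor pairs of A/4 (objective: alternative).

-- ===== PORT A =====
-- int(math.sqrt(A)) is ported as Nat.sqrt A.toNat, which is exact for every 0 ≤ A ≤ 2^31 (all of Dom);
-- A < 0, where math.sqrt raises ValueError, is excluded by Pre_rectangle_count.
def rectangle_count (A : Int) : Int :=
  let lim : Int := (Nat.sqrt A.toNat : Int)
  (PySem.List.pyRange 1 (lim + 1) 1).foldl (fun count i =>
    if PySem.Int.mod A i = 0 then
      let t := PySem.Int.floordiv A i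
      if PySem.Int.mod i 2 = 0 ∧ PySem.Int.mod t 2 = 0 then
        if i = t then count + 1 else count
      else count + 1
    else count) 0

-- ===== PORT B =====
-- helper below_sqrt_divisors of Source B: plain count of the divisors of n that are <= sqrt(n)
def belowSqrtDivisors (n : Int) : Int :=
  let r : Int := (Nat.sqrt n.toNat : Int)
  ((PySem.List.pyRange 1 (r + 1) 1).map (fun i => if PySem.Int.mod n i = 0 then (1 : Int) else 0)).sum

def rectangle_count_alt (A : Int) : Int :=
  let total := belowSqrtDivisors A
  if 0 < A ∧ PySem.Int.mod A 4 = 0 then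
    let q := PySem.Int.floordiv A 4
    let s : Int := (Nat.sqrt q.toNat : Int)
    let total2 := total - belowSqrtDivisors q
    if s * s = q then total2 + 1 else total2
  else total

-- ===== PRECONDITION & SPEC =====
-- Pre_ excludes exactly A < 0, where Python's math.sqrt(A) raises ValueError in both programs.
def Pre_rectangle_count (A : Int) : Prop := 0 ≤ A
instance (A : Int) : Decidable (Pre_rectangle_count A) := by unfold Pre_rectangle_count; infer_instance
def pvWitness_rectangle_count : Int := (36)

def Spec_rectangle_count (A : Int) (out : Int) : Prop := out = rectangle_count_alt A
instance (A : Int) (out : Int) : Decidable (Spec_rectangle_count A out) := by unfold Spec_rectangle_count; infer_instance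

-- ===== CLAIM (what is proved, stated in full; the proofs are below) =====
def Claim_equal_rectangle_count : Prop := ∀ (A : Int), Dom_rectangle_count A → Pre_rectangle_count A → Spec_rectangle_count A (rectangle_count A)

-- ===== LEMMAS AND PROOFS =====

-- Nat-level counting predicates mirroring the two loops
def pvA (n i : ℕ) : Bool := decide (i ∣ n ∧ (¬(i % 2 = 0 ∧ (n / i) % 2 = 0) ∨ i = n / i))
def pvUp (n i : ℕ) : Bool := decide (i ∣ n)
def pvAcount (n : ℕ) : ℕ := List.countP (pvA n) (List.range' 1 (Nat.sqrt n))
def pvUcount (n : ℕ) : ℕ := List.countP (pvUp n) (List.range' 1 (Nat.sqrt n))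

lemma pInt_eq (n i : ℕ) :
    (decide (PySem.Int.mod (n:ℤ) (i:ℤ) = 0 ∧
      (¬(PySem.Int.mod (i:ℤ) 2 = 0 ∧ PySem.Int.mod (PySem.Int.floordiv (n:ℤ) (i:ℤ)) 2 = 0)
        ∨ (i:ℤ) = PySem.Int.floordiv (n:ℤ) (i:ℤ)))) = pvA n i := by
  apply decide_eq_decide.mpr
  have h2 : ((2:ℤ)) = ((2:ℕ) : ℤ) := by norm_num
  rw [h2]
  simp only [PySem.Int.floordiv_natCast, PySem.Int.mod_natCast, Nat.cast_eq_zero, Nat.cast_inj,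
    Nat.dvd_iff_mod_eq_zero]

lemma portA_eq (n : ℕ) : rectangle_count (n : Int) = (pvAcount n : Int) := by
  show (PySem.List.pyRange 1 (((Nat.sqrt (n:ℤ).toNat : ℤ)) + 1) 1).foldl (fun count i =>
    if PySem.Int.mod (n:ℤ) i = 0 then
      if PySem.Int.mod i 2 = 0 ∧ PySem.Int.mod (PySem.Int.floordiv (n:ℤ) i) 2 = 0 then
        if i = PySem.Int.floordiv (n:ℤ) i then count + 1 else count
      else count + 1
    else count) 0 = (pvAcount n : Int)
  have hbody : (fun (count i : ℤ) =>
      if PySem.Int.mod (n:ℤ) i = 0 then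
        if PySem.Int.mod i 2 = 0 ∧ PySem.Int.mod (PySem.Int.floordiv (n:ℤ) i) 2 = 0 then
          if i = PySem.Int.floordiv (n:ℤ) i then count + 1 else count
        else count + 1
      else count)
    = (fun count i => if (decide (PySem.Int.mod (n:ℤ) i = 0 ∧
      (¬(PySem.Int.mod i 2 = 0 ∧ PySem.Int.mod (PySem.Int.floordiv (n:ℤ) i) 2 = 0)
        ∨ i = PySem.Int.floordiv (n:ℤ) i))) = true then count + 1 else count) := by
    funext c i
    simp only [decide_eq_true_eq]
    split_ifs <;> tauto
  rw [hbody, PySem.List.foldl_count_if, PySem.List.pyRange_one, List.countP_map, zero_add]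
  have hlen : (((Nat.sqrt (n:ℤ).toNat : ℤ)) + 1 - 1).toNat = Nat.sqrt n := by simp
  rw [hlen]
  unfold pvAcount
  rw [List.range'_eq_map_range, List.countP_map]
  apply congrArg
  apply List.countP_congr
  intro k _
  have hc : ((1:ℤ) + (k:ℤ)) = ((1 + k : ℕ) : ℤ) := by push_cast; ring
  simp only [Function.comp, hc, pInt_eq n (1 + k)]

lemma helperB_eq (n : ℕ) : belowSqrtDivisors (n : Int) = (pvUcount n : Int) := by
  show ((PySem.List.pyRange 1 (((Nat.sqrt (n:ℤ).toNat : ℤ)) + 1) 1).map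
      (fun i => if PySem.Int.mod (n:ℤ) i = 0 then (1 : Int) else 0)).sum = (pvUcount n : Int)
  have hbody : (fun (i : ℤ) => if PySem.Int.mod (n:ℤ) i = 0 then (1 : Int) else 0)
      = (fun i => if (decide (PySem.Int.mod (n:ℤ) i = 0)) = true then (1:ℤ) else 0) := by
    funext i; simp only [decide_eq_true_eq]
  rw [hbody, PySem.List.sum_map_ite_one_zero, PySem.List.pyRange_one, List.countP_map]
  have hlen : (((Nat.sqrt (n:ℤ).toNat : ℤ)) + 1 - 1).toNat = Nat.sqrt n := by simp
  rw [hlen]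
  unfold pvUcount
  rw [List.range'_eq_map_range, List.countP_map]
  apply congrArg
  apply List.countP_congr
  intro k _
  have hc : ((1:ℤ) + (k:ℤ)) = ((1 + k : ℕ) : ℤ) := by push_cast; ring
  simp only [Function.comp, hc, pvUp, decide_eq_true_eq]
  rw [PySem.Int.mod_eq_zero_iff_dvd]
  exact_mod_cast Iff.rfl

lemma portB_eq (n : ℕ) : rectangle_count_alt (n : Int) =
    (if 0 < n ∧ n % 4 = 0 then
      ((pvUcount n : ℤ) - (pvUcount (n / 4) : ℤ) +
        if Nat.sqrt (n / 4) * Nat.sqrt (n / 4) = n / 4 then (1:ℤ) else 0)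
    else (pvUcount n : ℤ)) := by
  show (if 0 < (n:ℤ) ∧ PySem.Int.mod (n:ℤ) 4 = 0 then
      (if ((Nat.sqrt (PySem.Int.floordiv (n:ℤ) 4).toNat : ℤ)) * ((Nat.sqrt (PySem.Int.floordiv (n:ℤ) 4).toNat : ℤ)) = PySem.Int.floordiv (n:ℤ) 4
        then belowSqrtDivisors (n:ℤ) - belowSqrtDivisors (PySem.Int.floordiv (n:ℤ) 4) + 1
        else belowSqrtDivisors (n:ℤ) - belowSqrtDivisors (PySem.Int.floordiv (n:ℤ) 4))
    else belowSqrtDivisors (n:ℤ)) = _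
  have hfd : PySem.Int.floordiv (n:ℤ) 4 = ((n / 4 : ℕ) : ℤ) := by
    exact_mod_cast PySem.Int.floordiv_natCast n 4
  have hcond : (0 < (n:ℤ) ∧ PySem.Int.mod (n:ℤ) 4 = 0) ↔ (0 < n ∧ n % 4 = 0) := by
    rw [show ((4:ℤ)) = ((4:ℕ) : ℤ) from by norm_num, PySem.Int.mod_natCast]
    constructor <;> intro ⟨h1, h2⟩ <;> exact ⟨by exact_mod_cast h1, by exact_mod_cast h2⟩
  have hsq : (((Nat.sqrt (PySem.Int.floordiv (n:ℤ) 4).toNat : ℤ)) * ((Nat.sqrt (PySem.Int.floordiv (n:ℤ) 4).toNat : ℤ)) = PySem.Int.floordiv (n:ℤ) 4)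
      ↔ (Nat.sqrt (n / 4) * Nat.sqrt (n / 4) = n / 4) := by
    rw [hfd, Int.toNat_natCast]
    exact_mod_cast Iff.rfl
  by_cases hc : 0 < n ∧ n % 4 = 0
  · rw [if_pos (hcond.mpr hc), if_pos hc, hfd, Int.toNat_natCast, helperB_eq, helperB_eq]
    by_cases hs : Nat.sqrt (n / 4) * Nat.sqrt (n / 4) = n / 4
    · rw [if_pos (by exact_mod_cast hs), if_pos hs]
    · rw [if_neg (by exact_mod_cast fun h => hs (by exact_mod_cast h)), if_neg hs]
      ring
  · rw [if_neg (fun h => hc (hcond.mp h)), if_neg hc, helperB_eq]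

lemma countP_eq_card_filter_Icc (p : ℕ → Bool) (s : ℕ) :
    List.countP p (List.range' 1 s) = ((Finset.Icc 1 s).filter (fun i => p i)).card := by
  rw [Nat.Icc_eq_range', List.countP_eq_length_filter]
  simp [Finset.filter, Finset.card, Multiset.filter_coe]

lemma count_eq_no4 (n : ℕ) (h : ¬(0 < n ∧ n % 4 = 0)) : pvAcount n = pvUcount n := by
  unfold pvAcount pvUcount
  apply List.countP_congr
  intro i hi
  rw [List.mem_range'] at hi
  obtain ⟨k, hk, hik⟩ := hi
  simp only [pvA, pvUp, decide_eq_true_eq]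
  constructor
  · exact fun ⟨hd, _⟩ => hd
  · intro hd
    refine ⟨hd, Or.inl ?_⟩
    rintro ⟨he1, he2⟩
    have hn : i * (n / i) = n := Nat.mul_div_cancel' hd
    obtain ⟨a, ha⟩ : ∃ a, i = 2 * a := ⟨i / 2, by omega⟩
    obtain ⟨b, hb⟩ : ∃ b, n / i = 2 * b := ⟨(n / i) / 2, by omega⟩
    have h4 : n = 4 * (a * b) := by rw [← hn, hb, ha]; ring
    have hpos : 0 < n := Nat.sqrt_pos.mp (by omega)
    exact h ⟨hpos, by omega⟩

lemma filter_card_split (s : Finset ℕ) (p q : ℕ → Prop) [DecidablePred p] [DecidablePred q] :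
    (s.filter p).card = (s.filter (fun i => p i ∧ q i)).card + (s.filter (fun i => p i ∧ ¬ q i)).card := by
  rw [← Finset.filter_filter, ← Finset.filter_filter, Finset.card_filter_add_card_filter_not]

lemma count_eq_4 (n : ℕ) (h0 : 0 < n) (h4 : n % 4 = 0) :
    pvAcount n + pvUcount (n / 4) =
      pvUcount n + (if Nat.sqrt (n / 4) * Nat.sqrt (n / 4) = n / 4 then 1 else 0) := by
  have hq4 : n = 4 * (n / 4) := by omega
  set q := n / 4 with hq
  set s := Nat.sqrt n with hs
  -- Finset forms
  have hA : pvAcount n = ((Finset.Icc 1 s).filter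
      (fun i => i ∣ n ∧ (¬(i % 2 = 0 ∧ (n / i) % 2 = 0) ∨ i = n / i))).card := by
    rw [pvAcount, countP_eq_card_filter_Icc]
    congr 1
    apply Finset.filter_congr
    intro i _
    simp only [pvA, decide_eq_true_eq]
  have hU : pvUcount n = ((Finset.Icc 1 s).filter (fun i => i ∣ n)).card := by
    rw [pvUcount, countP_eq_card_filter_Icc]
    congr 1
    apply Finset.filter_congr
    intro i _
    simp only [pvUp, decide_eq_true_eq]
  have hUq : pvUcount q = ((Finset.Icc 1 (Nat.sqrt q)).filter (fun j => j ∣ q)).card := by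
    rw [pvUcount, countP_eq_card_filter_Icc]
    congr 1
    apply Finset.filter_congr
    intro j _
    simp only [pvUp, decide_eq_true_eq]
  -- split A's kept set into the not-both-even part and the equal-both-even part
  have hAsplit : ((Finset.Icc 1 s).filter
      (fun i => i ∣ n ∧ (¬(i % 2 = 0 ∧ (n / i) % 2 = 0) ∨ i = n / i))).card =
      ((Finset.Icc 1 s).filter (fun i => (i ∣ n ∧ ¬(i % 2 = 0 ∧ (n / i) % 2 = 0)))).card +
      ((Finset.Icc 1 s).filter (fun i => (i ∣ n ∧ (i % 2 = 0 ∧ (n / i) % 2 = 0)) ∧ i = n / i)).card := by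
    rw [← Finset.card_union_of_disjoint]
    · congr 1
      rw [← Finset.filter_or]
      apply Finset.filter_congr
      intro i _
      constructor
      · rintro ⟨hd, hc | he⟩
        · exact Or.inl ⟨hd, hc⟩
        · by_cases hb : i % 2 = 0 ∧ (n / i) % 2 = 0
          · exact Or.inr ⟨⟨hd, hb⟩, he⟩
          · exact Or.inl ⟨hd, hb⟩
      · rintro (⟨hd, hc⟩ | ⟨⟨hd, _⟩, he⟩)
        · exact ⟨hd, Or.inl hc⟩
        · exact ⟨hd, Or.inr he⟩
    · rw [Finset.disjoint_left]
      intro i hi hj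
      rw [Finset.mem_filter] at hi hj
      exact hi.2.2 hj.2.1.2
  -- split U's set by both-even
  have hUsplit : ((Finset.Icc 1 s).filter (fun i => i ∣ n)).card =
      ((Finset.Icc 1 s).filter (fun i => i ∣ n ∧ (i % 2 = 0 ∧ (n / i) % 2 = 0))).card +
      ((Finset.Icc 1 s).filter (fun i => i ∣ n ∧ ¬(i % 2 = 0 ∧ (n / i) % 2 = 0))).card :=
    filter_card_split _ _ _
  -- bijection i ↦ i / 2 between both-even divisors ≤ √n of n and divisors ≤ √q of q
  have hbij : ((Finset.Icc 1 s).filter (fun i => i ∣ n ∧ (i % 2 = 0 ∧ (n / i) % 2 = 0))).card =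
      ((Finset.Icc 1 (Nat.sqrt q)).filter (fun j => j ∣ q)).card := by
    apply Finset.card_nbij' (i := fun i => i / 2) (j := fun j => 2 * j)
    · intro i hi
      simp only [Finset.coe_filter, Set.mem_setOf_eq, Finset.mem_Icc] at hi ⊢
      obtain ⟨⟨hi1, hi2⟩, hd, he1, he2⟩ := hi
      have hn : i * (n / i) = n := Nat.mul_div_cancel' hd
      obtain ⟨a, ha⟩ : ∃ a, i = 2 * a := ⟨i / 2, by omega⟩
      obtain ⟨b, hb⟩ : ∃ b, n / i = 2 * b := ⟨(n / i) / 2, by omega⟩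
      have hab : n = 4 * (a * b) := by rw [← hn, hb, ha]; ring
      have hqab : q = a * b := by omega
      have hii : i * i ≤ n := Nat.le_sqrt.mp hi2
      have hiaa : i * i = 4 * (a * a) := by rw [ha]; ring
      refine ⟨⟨by omega, ?_⟩, ?_⟩
      · rw [Nat.le_sqrt]
        have : i / 2 = a := by omega
        rw [this]
        omega
      · have : i / 2 = a := by omega
        rw [this, hqab]
        exact ⟨b, rfl⟩
    · intro j hj
      simp only [Finset.coe_filter, Set.mem_setOf_eq, Finset.mem_Icc] at hj ⊢
      obtain ⟨⟨hj1, hj2⟩, hd⟩ := hj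
      have hju : j * (q / j) = q := Nat.mul_div_cancel' hd
      set u := q / j with hu
      have heq : (2 * j) * (2 * u) = n := by rw [hq4, ← hju]; ring
      have hjj : j * j ≤ q := Nat.le_sqrt.mp hj2
      have hdn : n / (2 * j) = 2 * u := by rw [← heq, Nat.mul_div_cancel_left _ (by omega : 0 < 2 * j)]
      refine ⟨⟨by omega, ?_⟩, ⟨2 * u, heq.symm⟩, by omega, by omega⟩
      rw [Nat.le_sqrt]
      calc 2 * j * (2 * j) = 4 * (j * j) := by ring
        _ ≤ 4 * q := by omega
        _ = n := by omega
    · intro i hi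
      simp only [Finset.coe_filter, Set.mem_setOf_eq, Finset.mem_Icc] at hi
      show 2 * (i / 2) = i
      omega
    · intro j hj
      simp only [Finset.coe_filter, Set.mem_setOf_eq, Finset.mem_Icc] at hj
      show 2 * j / 2 = j
      omega
  -- the equal-both-even part has exactly one element iff q is a perfect square
  have hsq : ((Finset.Icc 1 s).filter (fun i => (i ∣ n ∧ (i % 2 = 0 ∧ (n / i) % 2 = 0)) ∧ i = n / i)).card =
      (if Nat.sqrt q * Nat.sqrt q = q then 1 else 0) := by
    by_cases hr : Nat.sqrt q * Nat.sqrt q = q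
    · rw [if_pos hr]
      have : ((Finset.Icc 1 s).filter (fun i => (i ∣ n ∧ (i % 2 = 0 ∧ (n / i) % 2 = 0)) ∧ i = n / i)) =
          {2 * Nat.sqrt q} := by
        ext i
        simp only [Finset.mem_filter, Finset.mem_Icc, Finset.mem_singleton]
        constructor
        · rintro ⟨⟨hi1, hi2⟩, ⟨hd, he1, he2⟩, he⟩
          have hn : i * (n / i) = n := Nat.mul_div_cancel' hd
          have hii : i * i = n := by rw [← hn, ← he]
          obtain ⟨a, ha⟩ : ∃ a, i = 2 * a := ⟨i / 2, by omega⟩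
          have haa : i * i = 4 * (a * a) := by rw [ha]; ring
          have hqa : q = a * a := by omega
          have : Nat.sqrt q = a := by rw [hqa]; rw [show a * a = a ^ 2 from (pow_two a).symm]; exact Nat.sqrt_eq' a
          omega
        · intro hi
          set r := Nat.sqrt q with hrdef
          have hq1 : 1 ≤ q := by omega
          have hr1 : 1 ≤ r := by
            rcases Nat.eq_zero_or_pos r with h | h
            · rw [h] at hr; simp at hr; omega
            · exact h
          have heqn : (2 * r) * (2 * r) = n := by
            calc (2 * r) * (2 * r) = 4 * (r * r) := by ring
              _ = 4 * q := by rw [hr]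
              _ = n := by omega
          have hdvd : i ∣ n := ⟨2 * r, by rw [hi, ← heqn]⟩
          have hdiv : n / (2 * r) = 2 * r := by
            rw [← heqn, Nat.mul_div_cancel_left _ (by omega : 0 < 2 * r)]
          refine ⟨⟨by omega, ?_⟩, ⟨hdvd, ?_, ?_⟩, ?_⟩
          · rw [hi, Nat.le_sqrt, heqn]
          · omega
          · rw [hi, hdiv]; omega
          · rw [hi, hdiv]
      rw [this, Finset.card_singleton]
    · rw [if_neg hr]
      have : ((Finset.Icc 1 s).filter (fun i => (i ∣ n ∧ (i % 2 = 0 ∧ (n / i) % 2 = 0)) ∧ i = n / i)) = ∅ := by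
        ext i
        simp only [Finset.mem_filter, Finset.mem_Icc, Finset.notMem_empty, iff_false]
        rintro ⟨⟨hi1, hi2⟩, ⟨hd, he1, he2⟩, he⟩
        have hn : i * (n / i) = n := Nat.mul_div_cancel' hd
        have hii : i * i = n := by rw [← hn, ← he]
        obtain ⟨a, ha⟩ : ∃ a, i = 2 * a := ⟨i / 2, by omega⟩
        have haa : i * i = 4 * (a * a) := by rw [ha]; ring
        have hqa : q = a * a := by omega
        have hsqa : Nat.sqrt (a * a) = a := by
          rw [show a * a = a ^ 2 from (pow_two a).symm]; exact Nat.sqrt_eq' a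
        exact hr (by rw [hqa, hsqa])
      rw [this, Finset.card_empty]
  rw [hA, hU, hUq, hAsplit, hUsplit, hbij, hsq]
  omega

-- ===== VERDICT (by name: the statement is the Claim_ definition above) =====
theorem rectangle_count_spec : Claim_equal_rectangle_count := by
  intro A _ h
  unfold Spec_rectangle_count
  have hA : A = ((A.toNat : ℕ) : ℤ) := (Int.toNat_of_nonneg h).symm
  rw [hA, portA_eq, portB_eq]
  set n := A.toNat
  by_cases hc : 0 < n ∧ n % 4 = 0
  · rw [if_pos hc]
    have h2 := count_eq_4 n hc.1 hc.2
    by_cases hs : Nat.sqrt (n / 4) * Nat.sqrt (n / 4) = n / 4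
    · rw [if_pos hs] at h2 ⊢
      omega
    · rw [if_neg hs] at h2 ⊢
      omega
  · rw [if_neg hc, count_eq_no4 n hc]
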